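-- pv_equiv track=rewrite | github.com/gokul21821/miami-records | src/config/doc_types.py | get_folder_name
-- ===== SOURCE A (Python) =====
-- DOCUMENT_TYPES = {
--     'MOR': {
--         'label': 'MORTGAGE - MOR',
--         'folder': 'MORTGAGE_MOR',
--         'description': 'Mortgage Records',
--         'party_type': 'borrower',
--         'counter_party_type': 'lender'
--     },
--     'LIE': {
--         'label': 'LIEN - LIE',
--         'folder': 'LIEN_LIE',
--         'description': 'Lien Records',
--         'party_type': 'debtor',
--         'counter_party_type': 'creditor'
--     }
-- }
--
-- DEFAULT_DOC_TYPE = 'MOR'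
--
-- def get_folder_name(doc_type: str) -> str:
--     """
--     Get folder name for document type.
--
--     Args:
--         doc_type: Document type code ('MOR', 'LIE') or label ('MORTGAGE - MOR', 'LIEN - LIE')
--
--     Returns:
--         Folder name string
--     """
--     # Handle both code and label inputs
--     doc_type_upper = doc_type.upper()
--
--     # Check if it's a label
--     for code, info in DOCUMENT_TYPES.items():
--         if info['label'] == doc_type_upper:
--             return info['folder']
--
--     # Check if it's a code
--     if doc_type_upper in DOCUMENT_TYPES:
--         return DOCUMENT_TYPES[doc_type_upper]['folder']
--
--     # Default fallback
--     return DOCUMENT_TYPES[DEFAULT_DOC_TYPE]['folder']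
-- ===== SOURCE B (Python) =====
-- # B constant-folds the fixed DOCUMENT_TYPES data: the only inputs that do not
-- # resolve to the MOR folder (as match or fallback) are the LIE code and label.
--
-- def get_folder_name(doc_type: str) -> str:
--     return 'LIEN_LIE' if doc_type.upper() in ('LIE', 'LIEN - LIE') else 'MORTGAGE_MOR'
-- ===== Notes on version B (the rewrite author's own statement) =====
-- stated objective: simpler
-- what changed: Drops the data table entirely: since DOCUMENT_TYPES is a fixed two-entry constant, B constant-folds A's label-scan loop, code-membership check and fallback into a single branch ('LIE'/'LIEN - LIE' -> LIEN_LIE, everything else -> MORTGAGE_MOR).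
import Mathlib
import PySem

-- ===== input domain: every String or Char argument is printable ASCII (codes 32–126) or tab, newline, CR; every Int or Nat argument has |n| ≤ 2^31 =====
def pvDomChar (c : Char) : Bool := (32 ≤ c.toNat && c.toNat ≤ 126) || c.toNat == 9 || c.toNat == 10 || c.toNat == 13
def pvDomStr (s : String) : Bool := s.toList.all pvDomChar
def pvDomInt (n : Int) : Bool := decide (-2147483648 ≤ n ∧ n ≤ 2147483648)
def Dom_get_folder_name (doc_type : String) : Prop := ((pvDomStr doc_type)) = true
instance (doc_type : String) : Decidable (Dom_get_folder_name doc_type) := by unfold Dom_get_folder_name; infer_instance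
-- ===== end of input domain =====

-- B constant-folds the fixed two-entry DOCUMENT_TYPES: A's scan/membership/fallback
-- collapses to one branch ('LIE'/'LIEN - LIE' -> LIEN_LIE, else MORTGAGE_MOR); objective: simpler.

-- ===== PORT A =====
-- module data used by A: DOCUMENT_TYPES (dict of dicts) and DEFAULT_DOC_TYPE
def pvDocTypes : PySem.Dict String (PySem.Dict String String) :=
  PySem.Dict.ofList
    [("MOR", PySem.Dict.ofList
        [("label", "MORTGAGE - MOR"), ("folder", "MORTGAGE_MOR"),
         ("description", "Mortgage Records"), ("party_type", "borrower"),
         ("counter_party_type", "lender")]),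
     ("LIE", PySem.Dict.ofList
        [("label", "LIEN - LIE"), ("folder", "LIEN_LIE"),
         ("description", "Lien Records"), ("party_type", "debtor"),
         ("counter_party_type", "creditor")])]

def pvDefaultDocType : String := "MOR"

-- the 'for code, info in DOCUMENT_TYPES.items(): if info['label'] == u: return info['folder']' loop
-- (keys 'label'/'folder' are present in every info dict, so getD with "" is exact for the [] lookups)
def pvLabelScan : List (String × PySem.Dict String String) → String → Option String
  | [], _ => none
  | (_, info) :: rest, u =>
    if info.getD "label" "" == u then some (info.getD "folder" "") else pvLabelScan rest u

def get_folder_name (doc_type : String) : String :=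
  let doc_type_upper := PySem.Str.upper doc_type
  match pvLabelScan pvDocTypes.items doc_type_upper with
  | some folder => folder
  | none =>
    if pvDocTypes.contains doc_type_upper then
      (pvDocTypes.getD doc_type_upper PySem.Dict.empty).getD "folder" ""
    else
      (pvDocTypes.getD pvDefaultDocType PySem.Dict.empty).getD "folder" ""

-- ===== PORT B =====
def get_folder_name_alt (doc_type : String) : String :=
  let u := PySem.Str.upper doc_type
  if u == "LIE" || u == "LIEN - LIE" then "LIEN_LIE" else "MORTGAGE_MOR"

-- ===== PRECONDITION & SPEC =====
def Spec_get_folder_name (doc_type : String) (out : String) : Prop := out = get_folder_name_alt doc_type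
instance (doc_type : String) (out : String) : Decidable (Spec_get_folder_name doc_type out) := by unfold Spec_get_folder_name; infer_instance

-- ===== CLAIM (what is proved, stated in full; the proofs are below) =====
def Claim_equal_get_folder_name : Prop := ∀ (doc_type : String), Dom_get_folder_name doc_type → Spec_get_folder_name doc_type (get_folder_name doc_type)

-- ===== LEMMAS AND PROOFS =====

theorem get_folder_name_eval (u : String) :
    (match pvLabelScan pvDocTypes.items u with
      | some folder => folder
      | none =>
        if pvDocTypes.contains u then
          (pvDocTypes.getD u PySem.Dict.empty).getD "folder" ""
        else
          (pvDocTypes.getD pvDefaultDocType PySem.Dict.empty).getD "folder" "") =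
    (if u == "LIE" || u == "LIEN - LIE" then "LIEN_LIE" else "MORTGAGE_MOR") := by
  by_cases h1 : u = "MORTGAGE - MOR"
  · subst h1; rfl
  · by_cases h2 : u = "LIEN - LIE"
    · subst h2; rfl
    · by_cases h3 : u = "MOR"
      · subst h3; rfl
      · by_cases h4 : u = "LIE"
        · subst h4; rfl
        · have b1 : ("MORTGAGE - MOR" == u) = false := by simp [Ne.symm h1]
          have b2 : ("LIEN - LIE" == u) = false := by simp [Ne.symm h2]
          have b3 : ("MOR" == u) = false := by simp [Ne.symm h3]
          have b4 : ("LIE" == u) = false := by simp [Ne.symm h4]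
          have c4 : (u == "LIE") = false := by simp [h4]
          have c2 : (u == "LIEN - LIE") = false := by simp [h2]
          simp [b1, b2, b3, b4, c4, c2, pvDocTypes, pvDefaultDocType, pvLabelScan,
            PySem.Dict.ofList, PySem.Dict.update, PySem.Dict.empty,
            PySem.Dict.insert, PySem.Dict.contains, PySem.Dict.getD, PySem.Dict.get?,
            List.find?, h1]

-- ===== VERDICT (by name: the statement is the Claim_ definition above) =====
theorem get_folder_name_spec : Claim_equal_get_folder_name := by
  intro doc_type _
  unfold Spec_get_folder_name get_folder_name get_folder_name_alt
  exact get_folder_name_eval (PySem.Str.upper doc_type)
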